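-- pv_equiv track=rewrite | github.com/fredericovolkmann/exercicios-da-prova | prof5.py | calcular_numero_de_vezes
-- ===== SOURCE A (Python) =====
-- def calcular_numero_de_vezes(pen_drive_capacity, arquivos):
--     # Ordenar o vetor de arquivos em ordem decrescente
--     arquivos.sort(reverse=True)
--
--     num_vezes = 0  # Inicializamos o contador de vezes que o pen drive será usado
--
--     # Enquanto houver arquivos para copiar
--     while len(arquivos) > 0:
--         capacidade_atual = pen_drive_capacity  # é a Capacidede inicial do pen drive
--         num_vezes += 1  # Iniciar uma nova rodada de uso do pen drive
--
--         i = 0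
--         while i < len(arquivos):
--             if arquivos[i] <= capacidade_atual:  # Se o arquivo cabe no pen drive
--                 capacidade_atual -= arquivos[i]  # diminui o tamanho do arquivo da capacidade
--                 arquivos[i] = 0  # Marca o arquivo como usado
--             i += 1
--
--         # Remove os arquivos que já foram  usados (com tamanho 0)
--         arquivos = [tamanho for tamanho in arquivos if tamanho > 0]
--
--     return num_vezes
-- ===== SOURCE B (Python) =====
-- def calcular_numero_de_vezes(pen_drive_capacity, arquivos):
--     # First-fit-decreasing: one pass over the files in descending order,
--     # placing each file into the earliest opened pen-drive pass with room.
--     bins = []  # remaining capacity of each pass, in opening order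
--     for f in sorted(arquivos, reverse=True):
--         for i, r in enumerate(bins):
--             if f <= r:
--                 bins[i] = r - f
--                 break
--         else:
--             bins.append(pen_drive_capacity - f)
--     return len(bins)
-- ===== Notes on version B (the rewrite author's own statement) =====
-- stated objective: alternative
-- what changed: Replaces A's repeated full passes over the shrinking file list (one scan per pen-drive trip, zero-marking and re-filtering) with a single first-fit-decreasing pass that places each file into the earliest open trip with room, counting open trips. Pre_ excludes inputs with a file larger than the capacity: a positive such file makes A loop forever, and a nonpositive one (possible only with negative capacity) can never be copied, an unspecifiable corner where A silently drops it and B gives it its own trip.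
-- outside the precondition, e.g. on calcular_numero_de_vezes(5, [7]): A does not finish within the time limit, B returns 1; on calcular_numero_de_vezes(-1000000007, [-1, 0, 0, -1, 0]): A returns 1, B returns 5
import Mathlib
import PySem

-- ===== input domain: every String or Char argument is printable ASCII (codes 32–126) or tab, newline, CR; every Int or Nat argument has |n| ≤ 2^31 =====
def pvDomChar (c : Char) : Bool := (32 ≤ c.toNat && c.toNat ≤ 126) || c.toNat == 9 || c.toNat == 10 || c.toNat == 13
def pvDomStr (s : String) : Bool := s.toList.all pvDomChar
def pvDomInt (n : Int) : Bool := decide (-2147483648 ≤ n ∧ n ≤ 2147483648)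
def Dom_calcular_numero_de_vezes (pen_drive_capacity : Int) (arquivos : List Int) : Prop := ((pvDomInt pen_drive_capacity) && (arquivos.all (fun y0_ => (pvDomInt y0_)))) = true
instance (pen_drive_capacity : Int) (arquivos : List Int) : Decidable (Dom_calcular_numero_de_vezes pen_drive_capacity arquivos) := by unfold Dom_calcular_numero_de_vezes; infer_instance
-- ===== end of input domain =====

-- B replaces A's repeated zero-mark-and-filter passes with one first-fit-decreasing pass
-- over the same sorted order (alternative decomposition, same cost). Python A sorts
-- `arquivos` in place; the equivalence proved here is about the RETURN value only.

-- ===== PORT A =====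
-- inner `while i < len(arquivos)` loop: marks each fitting file as 0, tracking capacity
def pvOnePass (cap : Int) : List Int → List Int
  | [] => []
  | x :: rest => if x ≤ cap then 0 :: pvOnePass (cap - x) rest else x :: pvOnePass cap rest

-- outer `while len(arquivos) > 0` loop, fuel-bounded (on inputs where the Python
-- loop terminates, each pass removes at least one file, so length+1 fuel suffices)
def pvLoopA (C : Int) : Nat → List Int → Int → Int
  | 0, _, acc => acc
  | _ + 1, [], acc => acc
  | f + 1, x :: rest, acc =>
      pvLoopA C f ((pvOnePass C (x :: rest)).filter (fun t => 0 < t)) (acc + 1)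

def calcular_numero_de_vezes (pen_drive_capacity : Int) (arquivos : List Int) : Int :=
  let s := PySem.List.sorted arquivos (fun x => x) true
  pvLoopA pen_drive_capacity (s.length + 1) s 0

-- ===== PORT B =====
-- place one file into the first open trip with room, else open a new trip
def pvFfdIns (C f : Int) : List Int → List Int
  | [] => [C - f]
  | b :: bs => if f ≤ b then (b - f) :: bs else b :: pvFfdIns C f bs

def calcular_numero_de_vezes_alt (pen_drive_capacity : Int) (arquivos : List Int) : Int :=
  let bins := (PySem.List.sorted arquivos (fun x => x) true).foldl
      (fun bins f => pvFfdIns pen_drive_capacity f bins) []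
  (bins.length : Int)

-- ===== PRECONDITION & SPEC =====
-- Pre_ excludes the inputs containing a file larger than the capacity: a positive such
-- file is never removed and A's outer while loop diverges; a nonpositive such file
-- (possible only for a negative capacity) can never be copied at all — an unspecifiable
-- corner where A silently drops it via the `> 0` filter while B gives it its own trip.
def Pre_calcular_numero_de_vezes (pen_drive_capacity : Int) (arquivos : List Int) : Prop :=
  ∀ x ∈ arquivos, x ≤ pen_drive_capacity
instance (pen_drive_capacity : Int) (arquivos : List Int) : Decidable (Pre_calcular_numero_de_vezes pen_drive_capacity arquivos) := by unfold Pre_calcular_numero_de_vezes; infer_instance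

def pvWitness_calcular_numero_de_vezes : Int × List Int := (10, [7, 3, 5, 2])

def Spec_calcular_numero_de_vezes (pen_drive_capacity : Int) (arquivos : List Int) (out : Int) : Prop := out = calcular_numero_de_vezes_alt pen_drive_capacity arquivos
instance (pen_drive_capacity : Int) (arquivos : List Int) (out : Int) : Decidable (Spec_calcular_numero_de_vezes pen_drive_capacity arquivos out) := by unfold Spec_calcular_numero_de_vezes; infer_instance

-- ===== CLAIM (what is proved, stated in full; the proofs are below) =====
def Claim_equal_calcular_numero_de_vezes : Prop := ∀ (pen_drive_capacity : Int) (arquivos : List Int), Dom_calcular_numero_de_vezes pen_drive_capacity arquivos → Pre_calcular_numero_de_vezes pen_drive_capacity arquivos → Spec_calcular_numero_de_vezes pen_drive_capacity arquivos (calcular_numero_de_vezes pen_drive_capacity arquivos)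

-- ===== LEMMAS AND PROOFS =====

-- the files a pass with remaining capacity `cap` leaves behind
def pvLeft (cap : Int) : List Int → List Int
  | [] => []
  | x :: rest => if x ≤ cap then pvLeft (cap - x) rest else x :: pvLeft cap rest

-- the remaining capacity after such a pass
def pvRemCap (cap : Int) : List Int → Int
  | [] => cap
  | x :: rest => if x ≤ cap then pvRemCap (cap - x) rest else pvRemCap cap rest

theorem pvLeft_subset (cap : Int) (xs : List Int) : ∀ y ∈ pvLeft cap xs, y ∈ xs := by
  induction xs generalizing cap with
  | nil => simp [pvLeft]
  | cons x rest ih =>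
    intro y hy
    simp only [pvLeft] at hy
    split at hy
    · exact List.mem_cons_of_mem _ (ih _ y hy)
    · rcases List.mem_cons.mp hy with h | h
      · simp [h]
      · exact List.mem_cons_of_mem _ (ih _ y h)

theorem pvLeft_length_le (cap : Int) (xs : List Int) : (pvLeft cap xs).length ≤ xs.length := by
  induction xs generalizing cap with
  | nil => simp [pvLeft]
  | cons x rest ih =>
    simp only [pvLeft]
    split
    · exact Nat.le_succ_of_le (ih _)
    · simpa using ih cap

-- A's zero-mark-then-filter pass computes pvLeft, provided every file is ≤ C
-- and the running capacity is either still C or already nonnegative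
theorem pvOnePass_filter (C : Int) (xs : List Int) (cap : Int)
    (hall : ∀ x ∈ xs, x ≤ C) (hcap : cap = C ∨ 0 ≤ cap) :
    (pvOnePass cap xs).filter (fun t => 0 < t) = pvLeft cap xs := by
  induction xs generalizing cap with
  | nil => simp [pvOnePass, pvLeft]
  | cons x rest ih =>
    have hx : x ≤ C := hall x (List.mem_cons_self)
    have hrest : ∀ y ∈ rest, y ≤ C := fun y hy => hall y (List.mem_cons_of_mem _ hy)
    simp only [pvOnePass, pvLeft]
    by_cases h : x ≤ cap
    · simp only [if_pos h, List.filter_cons, decide_eq_true_eq]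
      rw [if_neg (by omega)]
      exact ih (cap - x) hrest (Or.inr (by omega))
    · have hcap0 : 0 ≤ cap := by
        rcases hcap with he | h0
        · omega
        · exact h0
      simp only [if_neg h, List.filter_cons, decide_eq_true_eq]
      rw [if_pos (by omega)]
      exact congrArg (x :: ·) (ih cap hrest (Or.inr hcap0))

-- core FFD lemma: folding insertion over a head bin splits into that bin's pass and the rest
theorem pvFold_cons (C : Int) (xs : List Int) (b : Int) (bs : List Int) :
    xs.foldl (fun s f => pvFfdIns C f s) (b :: bs)
      = pvRemCap b xs :: (pvLeft b xs).foldl (fun s f => pvFfdIns C f s) bs := by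
  induction xs generalizing b bs with
  | nil => simp [pvRemCap, pvLeft]
  | cons x rest ih =>
    simp only [List.foldl_cons, pvFfdIns, pvRemCap, pvLeft]
    by_cases h : x ≤ b
    · simp only [if_pos h]
      exact ih (b - x) bs
    · simp only [if_neg h]
      rw [ih b (pvFfdIns C x bs)]
      rfl

def pvBins (C : Int) (xs : List Int) : Int :=
  ((xs.foldl (fun s f => pvFfdIns C f s) []).length : Int)

theorem pvBins_cons (C x : Int) (rest : List Int) (hx : x ≤ C) :
    pvBins C (x :: rest) = 1 + pvBins C (pvLeft C (x :: rest)) := by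
  unfold pvBins
  simp only [List.foldl_cons, pvFfdIns]
  rw [pvFold_cons]
  simp only [pvLeft, if_pos hx, List.length_cons]
  omega

theorem pvLoopA_eq (C : Int) (f : Nat) : ∀ (xs : List Int) (acc : Int),
    xs.length < f → (∀ x ∈ xs, x ≤ C) →
    pvLoopA C f xs acc = acc + pvBins C xs := by
  induction f with
  | zero => intro xs acc h; omega
  | succ f ih =>
    intro xs acc hlen hall
    match xs with
    | [] => simp [pvLoopA, pvBins]
    | x :: rest =>
      have hx : x ≤ C := hall x (List.mem_cons_self)
      simp only [pvLoopA]
      rw [pvOnePass_filter C (x :: rest) C hall (Or.inl rfl)]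
      have hlt : (pvLeft C (x :: rest)).length < f := by
        have h1 : (pvLeft C (x :: rest)).length ≤ rest.length := by
          simp only [pvLeft, if_pos hx]; exact pvLeft_length_le _ _
        simp only [List.length_cons] at hlen
        omega
      rw [ih (pvLeft C (x :: rest)) (acc + 1) hlt
          (fun y hy => hall y (pvLeft_subset C _ y hy))]
      rw [pvBins_cons C x rest hx]
      omega

-- ===== VERDICT (by name: the statement is the Claim_ definition above) =====
theorem calcular_numero_de_vezes_spec : Claim_equal_calcular_numero_de_vezes := by
  intro C arquivos _hdom hpre
  have hall : ∀ x ∈ PySem.List.sorted arquivos (fun x => x) true, x ≤ C :=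
    fun x hx => hpre x ((PySem.List.mem_sorted _ _ _ _).mp hx)
  have h := pvLoopA_eq C ((PySem.List.sorted arquivos (fun x => x) true).length + 1)
      (PySem.List.sorted arquivos (fun x => x) true) 0 (Nat.lt_succ_self _) hall
  simpa [Spec_calcular_numero_de_vezes, calcular_numero_de_vezes,
    calcular_numero_de_vezes_alt, pvBins] using h
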